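-- pv_equiv track=rewrite | github.com/quantumgenetics/quantumgenetics | by_mircea/abstract_api.py | get_number_gate_seq_relation
-- ===== SOURCE A (Python) =====
-- from collections import deque
-- from copy import deepcopy
--
-- def get_number_gate_seq_relation(depth, available_gates):
-- 	'''
-- 	Based on how many gates can there be, after a qubit,
-- 	all the possible combinations of the gates are generated in a list and
-- 	returned.
-- 	'''
-- 	av_gates_tuple = tuple()
-- 	for key in available_gates.keys():
-- 		av_gates_tuple += available_gates[key]
-- 	av_gates_tuple += ('i',)
-- 	mapping_list = []
-- 	current_seq_gates_list = []
-- 	dq = deque([(gate,0) for gate in av_gates_tuple])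
-- 	while dq:
-- 		gate, d = dq.pop()
--
-- 		current_seq_gates_list = current_seq_gates_list[:d]
--
-- 		current_seq_gates_list.append(gate)
--
-- 		if d == depth - 1:
-- 			mapping_list.append(deepcopy(current_seq_gates_list))
-- 		elif d < depth - 1:
-- 			for g in av_gates_tuple:
-- 				dq.append((g,d+1,))
--
-- 	return mapping_list
-- ===== SOURCE B (Python) =====
-- def get_number_gate_seq_relation(depth, available_gates):
-- 	'''Same result as the DFS version, built directly as a cartesian
-- 	product of the reversed gate alphabet (no stack, slicing or deepcopy).'''
-- 	alphabet = [g for gates in available_gates.values() for g in gates]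
-- 	alphabet.append('i')
-- 	alphabet.reverse()
-- 	if depth <= 0:
-- 		return []
-- 	seqs = [[]]
-- 	for _ in range(depth):
-- 		seqs = [s + [g] for s in seqs for g in alphabet]
-- 	return seqs
-- ===== Notes on version B (the rewrite author's own statement) =====
-- stated objective: simpler
-- what changed: Replaces the explicit deque-based DFS with shared-prefix slicing and deepcopy by a direct iterative cartesian product over the reversed gate alphabet.
import Mathlib
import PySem

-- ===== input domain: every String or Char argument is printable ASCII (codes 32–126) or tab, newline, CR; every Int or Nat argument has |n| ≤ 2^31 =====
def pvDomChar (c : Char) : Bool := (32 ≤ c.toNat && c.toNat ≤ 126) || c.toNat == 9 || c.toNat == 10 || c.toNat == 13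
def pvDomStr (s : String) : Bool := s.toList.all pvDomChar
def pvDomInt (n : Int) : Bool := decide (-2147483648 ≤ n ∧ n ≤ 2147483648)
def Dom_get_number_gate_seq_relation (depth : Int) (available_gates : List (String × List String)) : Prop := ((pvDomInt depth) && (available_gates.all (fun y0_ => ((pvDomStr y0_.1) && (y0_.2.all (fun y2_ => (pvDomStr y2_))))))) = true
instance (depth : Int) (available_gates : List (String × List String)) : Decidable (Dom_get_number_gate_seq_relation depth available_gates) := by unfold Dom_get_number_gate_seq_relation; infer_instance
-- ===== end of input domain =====

-- B replaces A's deque DFS (shared prefix list, slicing, deepcopy) by a direct iterative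
-- cartesian product over the reversed gate alphabet; same return value, no speed claim.

-- ===== PORT A =====
-- fuel bound for the while loop: each iteration strictly decreases the stack weight
-- Σ (k+1)^((depth-1-d)⁺) (proved below in pvALoop_group), so pvM + 1 iterations suffice
def pvM (depth : Int) (k : Nat) (dq : List (String × Int)) : Nat :=
  (dq.map (fun p => (k + 1) ^ ((depth - 1 - p.2).toNat))).sum

-- A's while-loop over the deque; the list holds the deque right-end-first
-- (head = the element deque.pop() returns), so pop = head and
-- "for g in av: dq.append((g,d+1))" = push the reversed child list on the front.
-- The fuel only makes the recursion total; the caller supplies более than enough.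
def pvALoop (depth : Int) (alph : List String) :
    Nat → List (String × Int) → List String → List (List String) → List (List String)
  | _, [], _, acc => acc
  | 0, _ :: _, _, acc => acc   -- fuel exhausted: never reached from the entry point
  | fuel + 1, (gate, d) :: dq, cur, acc =>
    -- current_seq_gates_list = current_seq_gates_list[:d]; .append(gate)
    -- (every reachable d is ≥ 0, so [:d] is take d)
    let cur' := cur.take d.toNat ++ [gate]
    if d = depth - 1 then pvALoop depth alph fuel dq cur' (acc ++ [cur'])
    else if d < depth - 1 then
      pvALoop depth alph fuel ((alph.map (fun g => (g, d + 1))).reverse ++ dq) cur' acc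
    else pvALoop depth alph fuel dq cur' acc

def get_number_gate_seq_relation (depth : Int) (available_gates : List (String × List String)) : List (List String) :=
  -- for key in available_gates.keys(): av_gates_tuple += available_gates[key]
  -- (dict keys are unique, so each lookup returns that item's own tuple)
  let av := available_gates.foldl (fun t kv => t ++ kv.2) []
  -- av_gates_tuple += ('i',)
  let av := av ++ ["i"]
  -- dq = deque([(gate,0) for gate in av]); pop() takes the RIGHT end, hence reverse here
  let dq0 := (av.map (fun g => (g, (0 : Int)))).reverse
  pvALoop depth av (pvM depth av.length dq0 + 1) dq0 [] []

-- ===== PORT B =====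
def get_number_gate_seq_relation_alt (depth : Int) (available_gates : List (String × List String)) : List (List String) :=
  let alphabet := available_gates.flatMap (fun kv => kv.2)
  let alphabet := alphabet ++ ["i"]
  let alphabet := alphabet.reverse
  if depth ≤ 0 then []
  else
    (List.range depth.toNat).foldl
      (fun seqs _ => seqs.flatMap (fun s => alphabet.map (fun g => s ++ [g]))) [[]]

-- ===== PRECONDITION & SPEC =====
def Spec_get_number_gate_seq_relation (depth : Int) (available_gates : List (String × List String)) (out : List (List String)) : Prop := out = get_number_gate_seq_relation_alt depth available_gates
instance (depth : Int) (available_gates : List (String × List String)) (out : List (List String)) : Decidable (Spec_get_number_gate_seq_relation depth available_gates out) := by unfold Spec_get_number_gate_seq_relation; infer_instance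

-- ===== CLAIM (what is proved, stated in full; the proofs are below) =====
def Claim_equal_get_number_gate_seq_relation : Prop := ∀ (depth : Int) (available_gates : List (String × List String)), Dom_get_number_gate_seq_relation depth available_gates → Spec_get_number_gate_seq_relation depth available_gates (get_number_gate_seq_relation depth available_gates)

-- ===== LEMMAS AND PROOFS =====

theorem pvSumMapConst {α : Type} (l : List α) (c : Nat) :
    (l.map (fun _ => c)).sum = l.length * c := by
  induction l with
  | nil => simp
  | cons x xs _ => simp; ring

theorem pvPushLt (k e : Nat) : k * (k + 1) ^ e < (k + 1) ^ (e + 1) := by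
  have hp : 0 < (k + 1) ^ e := pow_pos (by omega) e
  calc k * (k + 1) ^ e < (k + 1) * (k + 1) ^ e := by
        exact Nat.mul_lt_mul_of_lt_of_le (by omega) (le_refl _) hp
    _ = (k + 1) ^ (e + 1) := by rw [pow_succ]; ring

theorem pvM_nil (depth : Int) (k : Nat) : pvM depth k [] = 0 := rfl

theorem pvM_cons (depth : Int) (k : Nat) (g : String) (d : Int) (dq : List (String × Int)) :
    pvM depth k ((g, d) :: dq) = (k + 1) ^ ((depth - 1 - d).toNat) + pvM depth k dq := by
  simp [pvM]

theorem pvM_append (depth : Int) (k : Nat) (l1 l2 : List (String × Int)) :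
    pvM depth k (l1 ++ l2) = pvM depth k l1 + pvM depth k l2 := by
  simp [pvM]

theorem pvM_group (depth : Int) (k : Nat) (d : Int) (rev : List String) :
    pvM depth k (rev.map (fun g => (g, d))) = rev.length * (k + 1) ^ ((depth - 1 - d).toNat) := by
  unfold pvM
  rw [List.map_map]
  simp only [Function.comp_def]
  exact pvSumMapConst rev _

theorem pvM_children (depth : Int) (alph : List String) (d : Int) (hd : d < depth - 1) :
    pvM depth alph.length (alph.reverse.map (fun g => (g, d + 1)))
      < (alph.length + 1) ^ ((depth - 1 - d).toNat) := by
  have he : (depth - 1 - d).toNat = (depth - 1 - (d + 1)).toNat + 1 := by omega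
  rw [pvM_group, List.length_reverse, he]
  exact pvPushLt _ _

theorem pvALoop_nil (depth : Int) (alph : List String) (fuel : Nat) (cur : List String)
    (acc : List (List String)) : pvALoop depth alph fuel [] cur acc = acc := by
  cases fuel <;> rfl

theorem pvALoop_cons (depth : Int) (alph : List String) (fuel : Nat) (gate : String) (d : Int)
    (dq : List (String × Int)) (cur : List String) (acc : List (List String)) :
    pvALoop depth alph (fuel + 1) ((gate, d) :: dq) cur acc =
      if d = depth - 1 then
        pvALoop depth alph fuel dq (cur.take d.toNat ++ [gate])
          (acc ++ [cur.take d.toNat ++ [gate]])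
      else if d < depth - 1 then
        pvALoop depth alph fuel ((alph.map (fun g => (g, d + 1))).reverse ++ dq)
          (cur.take d.toNat ++ [gate]) acc
      else pvALoop depth alph fuel dq (cur.take d.toNat ++ [gate]) acc := rfl

theorem pvFlatMapSingleton {α β : Type} (f : α → β) (l : List α) :
    l.flatMap (fun x => [f x]) = l.map f := by
  induction l <;> simp [*]

-- lexicographic product, most significant position first (DFS emission order)
def pvQ (rev : List String) : Nat → List (List String)
  | 0 => [[]]
  | n + 1 => rev.flatMap (fun g => (pvQ rev n).map (fun t => g :: t))

-- product as B builds it, extending sequences on the right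
def pvP (rev : List String) : Nat → List (List String)
  | 0 => [[]]
  | n + 1 => (pvP rev n).flatMap (fun s => rev.map (fun g => s ++ [g]))

-- sequences A's DFS records in the subtree rooted at (g, d) with prefix p, b = depth-1-d
def pvEmit (rev : List String) : Nat → List String → String → List (List String)
  | 0, p, g => [p ++ [g]]
  | b + 1, p, g => rev.flatMap (fun g' => pvEmit rev b (p ++ [g]) g')

theorem pvEmit_eq (rev : List String) :
    ∀ (b : Nat) (p : List String) (g : String),
      pvEmit rev b p g = (pvQ rev b).map (fun t => p ++ g :: t) := by
  intro b
  induction b with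
  | zero => intro p g; simp [pvEmit, pvQ]
  | succ b ih =>
      intro p g
      simp [pvEmit, pvQ, ih, List.map_flatMap, List.map_map, Function.comp_def]

theorem pvQ_step (rev : List String) :
    ∀ n, pvQ rev (n + 1) = (pvQ rev n).flatMap (fun s => rev.map (fun g => s ++ [g])) := by
  intro n
  induction n with
  | zero => simp only [pvQ]; exact (pvFlatMapSingleton (fun g => [g]) rev).trans (by simp)
  | succ n ih =>
      show pvQ rev (n + 2) = _
      calc pvQ rev (n + 2) = rev.flatMap (fun g => (pvQ rev (n + 1)).map (fun t => g :: t)) := rfl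
        _ = rev.flatMap (fun g =>
              ((pvQ rev n).flatMap (fun s => rev.map (fun g' => s ++ [g']))).map (fun t => g :: t)) := by
              rw [ih]
        _ = (pvQ rev (n + 1)).flatMap (fun s => rev.map (fun g => s ++ [g])) := by
              simp [pvQ, List.map_flatMap, List.flatMap_map, List.map_map,
                Function.comp_def, List.flatMap_assoc, List.cons_append]

theorem pvP_eq_pvQ (rev : List String) : ∀ n, pvP rev n = pvQ rev n := by
  intro n
  induction n with
  | zero => rfl
  | succ n ih => rw [pvQ_step]; show (pvP rev n).flatMap _ = _; rw [ih]

theorem pvFoldl_range (rev : List String) (n : Nat) :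
    (List.range n).foldl
      (fun seqs _ => seqs.flatMap (fun s => rev.map (fun g => s ++ [g]))) [[]] = pvP rev n := by
  induction n with
  | zero => rfl
  | succ n ih => rw [List.range_succ, List.foldl_append, ih]; rfl

-- with depth ≤ 0 every initial entry (g,0) just gets popped: nothing is recorded
theorem pvALoop_noop (depth : Int) (alph : List String) (hd : depth ≤ 0) :
    ∀ (l : List (String × Int)) (fuel : Nat) (cur : List String) (acc : List (List String)),
      l.length < fuel → (∀ p ∈ l, p.2 = 0) → pvALoop depth alph fuel l cur acc = acc := by
  intro l
  induction l with
  | nil => intro fuel cur acc _ _; exact pvALoop_nil ..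
  | cons p l ih =>
      intro fuel cur acc hfuel h0
      obtain ⟨g, d⟩ := p
      have hd0 : d = 0 := h0 (g, d) (by simp)
      obtain ⟨f, rfl⟩ : ∃ f, fuel = f + 1 := ⟨fuel - 1, by simp at hfuel ⊢; omega⟩
      rw [pvALoop_cons, if_neg (by omega), if_neg (by omega)]
      exact ih f _ _ (by simp at hfuel ⊢; omega) (fun q hq => h0 q (by simp [hq]))

-- the DFS invariant: processing a group of same-depth entries on top of the stack
-- appends exactly the subtree emissions, only touches cur beyond position d,
-- and consumes fuel no faster than the stack weight pvM decreases
theorem pvALoop_group (depth : Int) (alph : List String) :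
    ∀ (b : Nat) (rev : List String) (d : Int) (dq : List (String × Int))
      (cur : List String) (acc : List (List String)) (fuel : Nat),
      d = depth - 1 - b → 0 ≤ d → d.toNat ≤ cur.length →
      pvM depth alph.length (rev.map (fun g => (g, d)) ++ dq) < fuel →
      ∃ (curF : List String) (fuelR : Nat),
        pvM depth alph.length dq < fuelR ∧
        d.toNat ≤ curF.length ∧
        curF.take d.toNat = cur.take d.toNat ∧
        pvALoop depth alph fuel (rev.map (fun g => (g, d)) ++ dq) cur acc
          = pvALoop depth alph fuelR dq curF
              (acc ++ rev.flatMap (fun g => pvEmit alph.reverse b (cur.take d.toNat) g)) := by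
  intro b
  induction b with
  | zero =>
      intro rev
      induction rev with
      | nil =>
          intro d dq cur acc fuel _ _ hlen hfuel
          exact ⟨cur, fuel, by simpa using hfuel, hlen, rfl, by simp⟩
      | cons g rest ih =>
          intro d dq cur acc fuel hdb hd0 hlen hfuel
          have htl : (cur.take d.toNat).length = d.toNat := by
            simp [List.length_take]; omega
          have hcur' : (cur.take d.toNat ++ [g]).take d.toNat = cur.take d.toNat :=
            List.take_left' htl
          have hw : 0 < (alph.length + 1) ^ ((depth - 1 - d).toNat) := pow_pos (by omega) _
          rw [List.map_cons, List.cons_append, pvM_cons] at hfuel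
          obtain ⟨f, rfl⟩ : ∃ f, fuel = f + 1 := ⟨fuel - 1, by omega⟩
          obtain ⟨curF, fuelR, hR, h1, h2, h3⟩ :=
            ih d dq (cur.take d.toNat ++ [g]) (acc ++ [cur.take d.toNat ++ [g]]) f hdb hd0
              (by simp [htl]) (by omega)
          refine ⟨curF, fuelR, hR, h1, by rw [h2, hcur'], ?_⟩
          rw [List.map_cons, List.cons_append, pvALoop_cons, if_pos (by omega)]
          rw [h3, hcur']
          simp [pvEmit, List.flatMap_cons, List.append_assoc]
  | succ b' ihb =>
      intro rev
      induction rev with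
      | nil =>
          intro d dq cur acc fuel _ _ hlen hfuel
          exact ⟨cur, fuel, by simpa using hfuel, hlen, rfl, by simp⟩
      | cons g rest ih =>
          intro d dq cur acc fuel hdb hd0 hlen hfuel
          have htl : (cur.take d.toNat).length = d.toNat := by
            simp [List.length_take]; omega
          have hcl : (cur.take d.toNat ++ [g]).length = d.toNat + 1 := by simp [htl]
          rw [List.map_cons, List.cons_append, pvM_cons] at hfuel
          obtain ⟨f, rfl⟩ : ∃ f, fuel = f + 1 := by
            have : 0 < (alph.length + 1) ^ ((depth - 1 - d).toNat) := pow_pos (by omega) _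
            exact ⟨fuel - 1, by omega⟩
          -- process the subtree of g via the outer IH at depth d+1
          obtain ⟨c1, fuelR1, hM1, hc1len, hc1take, hc1eq⟩ :=
            ihb alph.reverse (d + 1) (rest.map (fun g => (g, d)) ++ dq)
              (cur.take d.toNat ++ [g]) acc f (by omega) (by omega)
              (by rw [hcl]; omega)
              (by
                rw [pvM_append]
                have hch2 := pvM_children depth alph d (by omega)
                omega)
          have hfull : (cur.take d.toNat ++ [g]).take (d + 1).toNat = cur.take d.toNat ++ [g] := by
            apply List.take_of_length_le; omega
          have hc1d : c1.take d.toNat = cur.take d.toNat := by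
            have h5 : c1.take (d + 1).toNat = cur.take d.toNat ++ [g] := by rw [hc1take, hfull]
            have h4 : (c1.take (d + 1).toNat).take d.toNat = c1.take d.toNat := by
              rw [List.take_take]; congr 1; omega
            rw [← h4, h5, List.take_left' htl]
          -- then the remaining siblings via the inner IH
          obtain ⟨c2, fuelR2, hM2, hc2len, hc2take, hc2eq⟩ :=
            ih d dq c1
              (acc ++ alph.reverse.flatMap
                (fun g' => pvEmit alph.reverse b' ((cur.take d.toNat ++ [g]).take (d + 1).toNat) g'))
              fuelR1 hdb hd0 (by omega) hM1
          refine ⟨c2, fuelR2, hM2, hc2len, by rw [hc2take, hc1d], ?_⟩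
          rw [List.map_cons, List.cons_append, pvALoop_cons,
            if_neg (by omega), if_pos (by omega), ← List.map_reverse]
          rw [hc1eq, hc2eq, hc1d, hfull]
          simp [pvEmit, List.flatMap_cons, List.append_assoc]

theorem pvMain (depth : Int) (available_gates : List (String × List String)) :
    get_number_gate_seq_relation depth available_gates
      = get_number_gate_seq_relation_alt depth available_gates := by
  unfold get_number_gate_seq_relation get_number_gate_seq_relation_alt
  have hav : available_gates.foldl (fun t kv => t ++ kv.2) []
      = available_gates.flatMap (fun kv => kv.2) := by
    simpa using PySem.List.foldl_append_eq_flatMap (fun kv : String × List String => kv.2)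
      available_gates
  rw [hav]
  by_cases hdep : depth ≤ 0
  · rw [if_pos hdep]
    apply pvALoop_noop _ _ hdep
    · -- fuel = pvM dq0 + 1 > dq0.length because every weight is ≥ 1
      generalize ((available_gates.flatMap (fun kv => kv.2) ++ ["i"]).map
        (fun g => (g, (0 : Int)))).reverse = dq0
      induction dq0 with
      | nil => simp [pvM_nil]
      | cons p l ihl =>
          obtain ⟨g, d⟩ := p
          rw [pvM_cons]
          have : 0 < ((available_gates.flatMap (fun kv => kv.2) ++ ["i"]).length + 1)
              ^ ((depth - 1 - d).toNat) := pow_pos (by omega) _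
          simp only [List.length_cons]
          omega
    · intro p hp
      simp only [List.mem_reverse, List.mem_map] at hp
      obtain ⟨g, _, hg⟩ := hp
      rw [← hg]
  · rw [if_neg hdep]
    rw [pvFoldl_range, pvP_eq_pvQ]
    obtain ⟨curF, fuelR, _, _, _, heq⟩ :=
      pvALoop_group depth (available_gates.flatMap (fun kv => kv.2) ++ ["i"])
        (depth - 1).toNat (available_gates.flatMap (fun kv => kv.2) ++ ["i"]).reverse
        0 [] [] []
        (pvM depth (available_gates.flatMap (fun kv => kv.2) ++ ["i"]).length
          ((available_gates.flatMap (fun kv => kv.2) ++ ["i"]).reverse.map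
            (fun g => (g, (0 : Int)))) + 1)
        (by omega) (by omega) (by simp)
        (by rw [List.append_nil]; omega)
    simp only [List.append_nil] at heq
    show pvALoop depth (available_gates.flatMap (fun kv => kv.2) ++ ["i"]) _
        ((List.map (fun g => (g, (0 : Int))) (available_gates.flatMap (fun kv => kv.2) ++ ["i"])).reverse)
        [] [] = _
    rw [← List.map_reverse, heq, pvALoop_nil]
    have hdt : depth.toNat = (depth - 1).toNat + 1 := by omega
    rw [hdt]
    simp [pvEmit_eq, pvQ]

-- ===== VERDICT (by name: the statement is the Claim_ definition above) =====
theorem get_number_gate_seq_relation_spec : Claim_equal_get_number_gate_seq_relation := by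
  intro depth available_gates _
  unfold Spec_get_number_gate_seq_relation
  exact pvMain depth available_gates
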